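-- pv_equiv track=rewrite | github.com/kamneelmaharaj-glitch/AGIcyborg | agi/deepen_ai.py | _starts_with_allowed_verb_titlecase
-- ===== SOURCE A (Python) =====
-- def _starts_with_allowed_verb_titlecase(step: str) -> bool:
--     s = (step or "").strip()
--     allowed = (
--     "Take", "Place", "Sit", "Stand", "Look", "Name",
--     "Notice", "Set", "Walk", "Turn", "Write", "Hold", "Rest",
--     "Put", "Move", "Clear", "Open", "Close", "Pause", "Step",
--     "Touch", "Drink", "Wash", "Stretch", "Rearrange",
--     )
--     return any(s.startswith(v + " ") or s == v for v in allowed)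
-- ===== SOURCE B (Python) =====
-- _ALLOWED_VERBS = frozenset(
--     "Take Place Sit Stand Look Name Notice Set Walk Turn Write Hold Rest "
--     "Put Move Clear Open Close Pause Step Touch Drink Wash Stretch Rearrange".split()
-- )
--
--
-- def _starts_with_allowed_verb_titlecase(step: str) -> bool:
--     s = (step or "").strip()
--     first = ""
--     for ch in s:
--         if ch == ' ':
--             break
--         first += ch
--     return first in _ALLOWED_VERBS
-- ===== Notes on version B (the rewrite author's own statement) =====
-- stated objective: simpler
-- what changed: B scans the stripped string once, accumulating characters up to the first space, and does a single set-membership test of that token, eliminating A's 26-way per-verb startswith/equality scan.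
import Mathlib
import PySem

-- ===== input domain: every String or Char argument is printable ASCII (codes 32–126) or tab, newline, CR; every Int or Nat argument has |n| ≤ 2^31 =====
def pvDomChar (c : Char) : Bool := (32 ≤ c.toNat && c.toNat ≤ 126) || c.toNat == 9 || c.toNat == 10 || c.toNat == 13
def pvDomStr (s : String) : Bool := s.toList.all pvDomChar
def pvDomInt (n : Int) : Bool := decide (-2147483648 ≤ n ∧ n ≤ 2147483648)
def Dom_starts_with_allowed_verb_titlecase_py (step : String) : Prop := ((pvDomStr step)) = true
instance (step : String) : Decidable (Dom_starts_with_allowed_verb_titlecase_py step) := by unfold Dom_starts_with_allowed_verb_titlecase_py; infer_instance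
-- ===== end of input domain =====

-- B replaces A's 26-way per-verb prefix/equality scan by one character scan that
-- accumulates the first space-delimited token, followed by one set-membership test
-- (objective: simpler).

-- ===== PORT A =====
def pvVerbsA : List String :=
  ["Take", "Place", "Sit", "Stand", "Look", "Name",
   "Notice", "Set", "Walk", "Turn", "Write", "Hold", "Rest",
   "Put", "Move", "Clear", "Open", "Close", "Pause", "Step",
   "Touch", "Drink", "Wash", "Stretch", "Rearrange"]

def starts_with_allowed_verb_titlecase_py (step : String) : Bool :=
  -- s = (step or "").strip()  ('step or ""' is step itself unless step == "")
  let s := PySem.Str.strip (if step == "" then "" else step)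
  -- any(s.startswith(v + " ") or s == v for v in allowed)
  pvVerbsA.any (fun v => PySem.Str.startswith s (v ++ " ") || s == v)

-- ===== PORT B =====
-- _ALLOWED_VERBS = frozenset("Take Place … Rearrange".split())
def pvAllowedVerbs : PySem.Set String :=
  PySem.Set.ofList (PySem.Str.split₀
    ("Take Place Sit Stand Look Name Notice Set Walk Turn Write Hold Rest " ++
     "Put Move Clear Open Close Pause Step Touch Drink Wash Stretch Rearrange"))

-- the for-loop with break: first = ""; for ch in s: if ch == ' ': break; first += ch
def pvFirstTok : List Char → List Char
  | [] => []
  | c :: rest => if c = ' ' then [] else c :: pvFirstTok rest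

def starts_with_allowed_verb_titlecase_py_alt (step : String) : Bool :=
  -- s = (step or "").strip()
  let s := PySem.Str.strip (if step == "" then "" else step)
  -- return first in _ALLOWED_VERBS
  PySem.Set.contains pvAllowedVerbs (String.ofList (pvFirstTok s.toList))

-- ===== PRECONDITION & SPEC =====
def Spec_starts_with_allowed_verb_titlecase_py (step : String) (out : Bool) : Prop := out = starts_with_allowed_verb_titlecase_py_alt step
instance (step : String) (out : Bool) : Decidable (Spec_starts_with_allowed_verb_titlecase_py step out) := by unfold Spec_starts_with_allowed_verb_titlecase_py; infer_instance

-- ===== CLAIM (what is proved, stated in full; the proofs are below) =====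
def Claim_equal_starts_with_allowed_verb_titlecase_py : Prop := ∀ (step : String), Dom_starts_with_allowed_verb_titlecase_py step → Spec_starts_with_allowed_verb_titlecase_py step (starts_with_allowed_verb_titlecase_py step)

-- ===== LEMMAS AND PROOFS =====

-- the break-loop computes the maximal space-free prefix
theorem pvFirstTok_eq_takeWhile (l : List Char) :
    pvFirstTok l = l.takeWhile (· ≠ ' ') := by
  induction l with
  | nil => rfl
  | cons c rest ih =>
    by_cases hc : c = ' ' <;> simp [pvFirstTok, hc, ih]

-- the maximal space-free prefix of v ++ ' ' :: t is v, when v is space-free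
theorem pv_takeWhile_append (v t : List Char) (hv : ' ' ∉ v) :
    (v ++ ' ' :: t).takeWhile (· ≠ ' ') = v := by
  induction v with
  | nil => simp
  | cons a l ih =>
    have ha : a ≠ ' ' := fun h => hv (h ▸ List.mem_cons_self)
    have ih' := ih (fun h => hv (List.mem_cons_of_mem _ h))
    simp only [ne_eq, decide_not] at ih' ⊢
    simp [ha, ih']

-- the first element surviving dropWhile fails the predicate
theorem pv_dropWhile_head (p : Char → Bool) (cs : List Char) (c : Char) (t : List Char)
    (h : cs.dropWhile p = c :: t) : p c = false := by
  induction cs with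
  | nil => simp [List.dropWhile] at h
  | cons a l ih =>
    rw [List.dropWhile_cons] at h
    by_cases hp : p a
    · exact ih (by simpa [hp] using h)
    · obtain ⟨rfl, -⟩ : a = c ∧ l = t := by simpa [hp] using h
      simpa using hp

-- a space-free word v: "starts with v followed by a space, or equals v" ↔
-- "the maximal space-free prefix is v".
theorem pv_word_iff (v cs : List Char) (hv : ' ' ∉ v) :
    ((v ++ [' ']) <+: cs ∨ cs = v) ↔ cs.takeWhile (· ≠ ' ') = v := by
  constructor
  · rintro (⟨t, ht⟩ | rfl)
    · rw [← ht, List.append_assoc, List.singleton_append]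
      exact pv_takeWhile_append v t hv
    · rw [List.takeWhile_eq_self_iff]
      intro a ha; simp only [decide_eq_true_eq]; rintro rfl; exact hv ha
  · intro h
    have hsplit := List.takeWhile_append_dropWhile (p := fun c => decide (c ≠ ' ')) (l := cs)
    rcases hd : cs.dropWhile (fun c => decide (c ≠ ' ')) with _ | ⟨c, t⟩
    · right; rw [← hsplit, hd, h]; simp
    · have hc' : c = ' ' := by
        have := pv_dropWhile_head _ _ _ _ hd
        simpa using this
      subst hc'
      exact Or.inl ⟨t, by rw [← hsplit, hd, h]; simp⟩

-- A's 26-way scan equals one membership test of the first space-free token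
set_option maxRecDepth 20000 in
theorem pv_main (s : String) :
    (pvVerbsA.any (fun v => PySem.Str.startswith s (v ++ " ") || s == v)) =
      PySem.Set.contains pvAllowedVerbs (String.ofList (s.toList.takeWhile (· ≠ ' '))) := by
  have hset : pvAllowedVerbs = pvVerbsA := by decide
  have hns : ∀ v ∈ pvVerbsA, ' ' ∉ v.toList := by decide
  rw [Bool.eq_iff_iff, hset]
  simp only [List.any_eq_true, Bool.or_eq_true, PySem.Str.startswith_eq, beq_iff_eq,
    PySem.Set.contains_iff, String.toList_append]
  have hsp : (" " : String).toList = [' '] := rfl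
  constructor
  · rintro ⟨v, hv, hcase⟩
    have htw : s.toList.takeWhile (· ≠ ' ') = v.toList := by
      apply (pv_word_iff v.toList s.toList (hns v hv)).mp
      rcases hcase with h | rfl
      · left
        have := (PySem.Chars.startswith_iff (s := s.toList) (p := v.toList ++ (" " : String).toList)).mp h
        rwa [hsp] at this
      · right; rfl
    rw [htw, String.ofList_toList]
    exact hv
  · intro hmem
    refine ⟨String.ofList (s.toList.takeWhile (· ≠ ' ')), hmem, ?_⟩
    have htw : s.toList.takeWhile (· ≠ ' ') =
        (String.ofList (s.toList.takeWhile (· ≠ ' '))).toList := (String.toList_ofList).symm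
    rcases (pv_word_iff _ s.toList (hns _ hmem)).mpr htw.symm.symm with h | h
    · left
      apply (PySem.Chars.startswith_iff _ _).mpr
      rwa [hsp]
    · right
      exact String.toList_inj.mp h

-- ===== VERDICT (by name: the statement is the Claim_ definition above) =====
theorem starts_with_allowed_verb_titlecase_py_spec : Claim_equal_starts_with_allowed_verb_titlecase_py := by
  intro step _
  unfold Spec_starts_with_allowed_verb_titlecase_py
    starts_with_allowed_verb_titlecase_py starts_with_allowed_verb_titlecase_py_alt
  dsimp only
  rw [pvFirstTok_eq_takeWhile]
  exact pv_main _
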